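-- pv_equiv track=rewrite | github.com/ssyy3034/kwon-dongha-portfolio | 프로그래머스/1/135808. 과일 장수/과일 장수.py | solution
-- ===== SOURCE A (Python) =====
-- def solution(k, m, score):
--     answer = 0
--     score.sort(reverse = True)
--     if(len(score)//m == 0):
--         return 0
--     else:
--         count = len(score)//m
--     score = score[:count*m]
--     for i in range(1,count+1):
--         answer += score[m*i-1]*m
--     return answer
-- ===== SOURCE B (Python) =====
-- def solution(k, m, score):
--     # Chunked greedy: sort descending (same in-place mutation as A), then
--     # walk the list a box (m elements) at a time; each box contributes
--     # m times its last (= smallest) element.  No count/floordiv/index math.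
--     score.sort(reverse=True)
--     if m <= 0:
--         return 0
--     total = 0
--     rest = score
--     while len(rest) >= m:
--         total += rest[m - 1] * m
--         rest = rest[m:]
--     return total
-- ===== Notes on version B (the rewrite author's own statement) =====
-- stated objective: alternative
-- what changed: A computes count = len//m, truncates the sorted list and loops over block-end indices m*i-1; B instead walks the descending-sorted list one m-element box at a time (take a box, add m times its last element, recurse on the rest), with no count/floordiv/index arithmetic.
import Mathlib
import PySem

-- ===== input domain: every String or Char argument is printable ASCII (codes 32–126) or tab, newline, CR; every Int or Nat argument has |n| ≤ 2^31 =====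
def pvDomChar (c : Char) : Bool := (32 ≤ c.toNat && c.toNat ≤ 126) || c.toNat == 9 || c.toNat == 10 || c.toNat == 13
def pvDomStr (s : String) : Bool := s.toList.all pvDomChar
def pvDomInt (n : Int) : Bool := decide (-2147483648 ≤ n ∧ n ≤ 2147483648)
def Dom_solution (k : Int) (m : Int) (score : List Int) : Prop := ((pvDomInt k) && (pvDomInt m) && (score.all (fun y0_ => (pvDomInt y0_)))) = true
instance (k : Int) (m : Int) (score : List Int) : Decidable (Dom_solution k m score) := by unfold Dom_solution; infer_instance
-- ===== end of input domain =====

-- B walks the descending-sorted list one m-element box at a time instead of A's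
-- indexed loop over block-end positions (objective: alternative decomposition).
-- Equivalence is about the RETURN value; both Pythons sort `score` in place descending.

-- ===== PORT A =====
def solution (k : Int) (m : Int) (score : List Int) : Int :=
  let s := PySem.List.sorted score (fun x => x) true
  let count := PySem.Int.floordiv (s.length : Int) m
  if count = 0 then 0
  else
    let s2 := PySem.List.slice s none (some (count * m))
    (PySem.List.pyRange 1 (count + 1)).foldl
      (fun answer i => answer + PySem.List.pyGetD s2 (m * i - 1) 0 * m) 0

-- ===== PORT B =====
-- fuel = length + 1 only makes the while-loop structurally total; with 0 < m each
-- pass removes at least one element, so the fuel is never exhausted.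
def chunkSumB (m : Int) : Nat → List Int → Int → Int
  | 0, _, total => total
  | fuel + 1, rest, total =>
    if m ≤ (rest.length : Int) then
      chunkSumB m fuel (PySem.List.slice rest (some m) none)
        (total + PySem.List.pyGetD rest (m - 1) 0 * m)
    else total

def solution_alt (k : Int) (m : Int) (score : List Int) : Int :=
  let s := PySem.List.sorted score (fun x => x) true
  if m ≤ 0 then 0
  else chunkSumB m (s.length + 1) s 0

-- ===== PRECONDITION & SPEC =====
-- Pre_ excludes only m = 0, where Python A raises ZeroDivisionError.
def Pre_solution (k : Int) (m : Int) (score : List Int) : Prop := m ≠ 0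
instance (k : Int) (m : Int) (score : List Int) : Decidable (Pre_solution k m score) := by unfold Pre_solution; infer_instance
def pvWitness_solution : Int × Int × List Int := (3, 2, [4, 1, 2, 3, 1])

def Spec_solution (k : Int) (m : Int) (score : List Int) (out : Int) : Prop := out = solution_alt k m score
instance (k : Int) (m : Int) (score : List Int) (out : Int) : Decidable (Spec_solution k m score out) := by unfold Spec_solution; infer_instance

-- ===== CLAIM (what is proved, stated in full; the proofs are below) =====
def Claim_equal_solution : Prop := ∀ (k : Int) (m : Int) (score : List Int), Dom_solution k m score → Pre_solution k m score → Spec_solution k m score (solution k m score)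

-- ===== LEMMAS AND PROOFS =====

-- canonical form of both loops: block sums over the descending list, one m-box at a time
def gold (M : Nat) (d : List Int) : Int :=
  if h : 1 ≤ M ∧ M ≤ d.length then
    d.getD (M - 1) 0 * (M : Int) + gold M (d.drop M)
  else 0
termination_by d.length
decreasing_by simp; omega

theorem gold_sum (M : Nat) (hM : 1 ≤ M) :
    ∀ (n : Nat) (d : List Int), d.length ≤ n →
      gold M d = ((List.range (d.length / M)).map
        (fun j => d.getD (M * (j + 1) - 1) 0 * (M : Int))).sum := by
  intro n
  induction n with
  | zero =>
    intro d hd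
    have hd0 : d.length = 0 := by omega
    rw [gold, dif_neg (by omega)]
    simp [hd0]
  | succ n ih =>
    intro d hd
    by_cases hle : M ≤ d.length
    · rw [gold, dif_pos ⟨hM, hle⟩]
      rw [ih (d.drop M) (by simp; omega)]
      rw [Nat.div_eq_sub_div (by omega) hle, List.range_succ_eq_map]
      simp only [List.map_cons, List.sum_cons, List.map_map, List.length_drop]
      congr 1
      · congr 2
        omega
      · apply congrArg List.sum
        apply List.map_congr_left
        intro j _
        simp only [Function.comp_apply, Nat.succ_eq_add_one]
        have hgd : (d.drop M).getD (M * (j + 1) - 1) 0 = d.getD (M * (j + 1 + 1) - 1) 0 := by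
          rw [List.getD_eq_getElem?_getD, List.getD_eq_getElem?_getD, List.getElem?_drop]
          have h1 : M * 1 ≤ M * (j + 1) := Nat.mul_le_mul_left M (by omega)
          have h2 : M * (j + 1 + 1) = M * (j + 1) + M := by ring
          have h3 : M + (M * (j + 1) - 1) = M * (j + 1 + 1) - 1 := by omega
          rw [h3]
        rw [hgd]
    · rw [gold, dif_neg (by omega)]
      have : d.length / M = 0 := Nat.div_eq_of_lt (by omega)
      simp [this]

theorem chunk_eq_gold (m : Int) (hm : 0 < m) :
    ∀ (fuel : Nat) (d : List Int) (total : Int), d.length < fuel →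
      chunkSumB m fuel d total = total + gold m.toNat d := by
  intro fuel
  induction fuel with
  | zero => intro d total h; omega
  | succ fuel ih =>
    intro d total h
    by_cases hc : m ≤ (d.length : Int)
    · have hM1 : 1 ≤ m.toNat := by omega
      have hMle : m.toNat ≤ d.length := by omega
      rw [chunkSumB, if_pos hc, PySem.List.slice_from d (le_of_lt hm)]
      rw [ih _ _ (by simp; omega)]
      have hg : gold m.toNat d
          = d.getD (m.toNat - 1) 0 * (m.toNat : Int) + gold m.toNat (d.drop m.toNat) := by
        rw [gold, dif_pos ⟨hM1, hMle⟩]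
      have hidx : PySem.List.pyGetD d (m - 1) 0 = d.getD (m.toNat - 1) 0 := by
        rw [show (m - 1 : Int) = ((m.toNat - 1 : Nat) : Int) by omega,
          PySem.List.pyGetD_natCast]
      rw [hg, hidx, Int.toNat_of_nonneg (le_of_lt hm)]
      ring
    · rw [chunkSumB, if_neg hc]
      have hg0 : gold m.toNat d = 0 := by
        rw [gold, dif_neg]
        rintro ⟨-, h2⟩
        have : (m.toNat : Int) ≤ (d.length : Int) := by exact_mod_cast h2
        omega
      rw [hg0]
      ring

theorem floordiv_nonpos_of_neg (a b : Int) (ha : 0 ≤ a) (hb : b < 0) :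
    PySem.Int.floordiv a b ≤ 0 := by
  simp only [PySem.Int.floordiv, Int.fdiv_eq_ediv]
  have h1 : a / b = -(a / (-b)) := by rw [← Int.ediv_neg, neg_neg]
  have h2 : 0 ≤ a / (-b) := Int.ediv_nonneg ha (by omega)
  split_ifs <;> omega

-- ===== VERDICT (by name: the statement is the Claim_ definition above) =====
theorem solution_spec : Claim_equal_solution := by
  intro k m score _dom hpre
  have hne : m ≠ 0 := hpre
  unfold Spec_solution solution solution_alt
  simp only []
  set d := PySem.List.sorted score (fun x => x) true with hd
  by_cases hm : 0 < m
  · obtain ⟨M, rfl⟩ : ∃ M : Nat, m = (M : Int) :=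
      ⟨m.toNat, (Int.toNat_of_nonneg (le_of_lt hm)).symm⟩
    have hM1 : 1 ≤ M := by exact_mod_cast hm
    rw [if_neg (by rw [not_le]; exact_mod_cast hM1 : ¬ (M : Int) ≤ 0)]
    rw [chunk_eq_gold (M : Int) hm (d.length + 1) d 0 (by omega), zero_add,
      Int.toNat_natCast]
    rw [PySem.Int.floordiv_natCast d.length M]
    by_cases hC : d.length / M = 0
    · rw [if_pos (by exact_mod_cast congrArg (Nat.cast : Nat → Int) hC)]
      have hlen : d.length < M := by
        rcases Nat.div_eq_zero_iff.mp hC with h | h <;> omega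
      rw [gold, dif_neg (by omega)]
    · rw [if_neg (by exact_mod_cast hC)]
      have hCM : ((d.length / M : Nat) : Int) * (M : Int)
          = (((d.length / M) * M : Nat) : Int) := by push_cast; ring
      rw [hCM, PySem.List.slice_to d (Int.natCast_nonneg _), Int.toNat_natCast]
      rw [PySem.List.pyRange_one]
      have htn : ∀ c : Nat, (((c : Int) + 1) - 1).toNat = c := by intro c; omega
      rw [htn]
      rw [PySem.List.foldl_add, zero_add, List.map_map]
      rw [gold_sum M hM1 d.length d le_rfl]
      apply congrArg List.sum
      apply List.map_congr_left
      intro j hj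
      have hjC : j < d.length / M := List.mem_range.mp hj
      simp only [Function.comp_apply]
      have h1 : 1 ≤ M * (j + 1) := Nat.one_le_iff_ne_zero.mpr (by positivity)
      have hidx : ((M : Int) * (1 + (j : Nat)) - 1 : Int)
          = ((M * (j + 1) - 1 : Nat) : Int) := by
        rw [Nat.cast_sub h1]
        push_cast
        ring
      rw [hidx, PySem.List.pyGetD_natCast]
      have hlt : M * (j + 1) - 1 < (d.length / M) * M := by
        have h2 : M * (j + 1) ≤ M * (d.length / M) :=
          Nat.mul_le_mul_left _ (by omega)
        have h3 : M * (d.length / M) = (d.length / M) * M := Nat.mul_comm _ _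
        omega
      have hgetD : (List.take ((d.length / M) * M) d).getD (M * (j + 1) - 1) 0
          = d.getD (M * (j + 1) - 1) 0 := by
        rw [List.getD_eq_getElem?_getD, List.getD_eq_getElem?_getD,
          List.getElem?_take_of_lt hlt]
      rw [hgetD]
  · have hmneg : m < 0 := by omega
    rw [if_pos (by omega : m ≤ 0)]
    have hcle : PySem.Int.floordiv (d.length : Int) m ≤ 0 :=
      floordiv_nonpos_of_neg _ _ (Int.natCast_nonneg _) hmneg
    by_cases hc0 : PySem.Int.floordiv (d.length : Int) m = 0
    · rw [if_pos hc0]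
    · rw [if_neg hc0, PySem.List.pyRange_one_eq_nil (by omega)]
      simp
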